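-- pv_equiv track=rewrite | github.com/pypi-data/pypi-mirror-361 | packages/net2i/net2i-2.4-py3-none-any.whl/net2i/net2i.py | _split_mac
-- ===== SOURCE A (Python) =====
-- from typing import List, Tuple, Optional, Dict, Any
--
-- def _split_mac(data: List[List], types_list: List[str]) -> Tuple[List[List], List[str]]:
--     #Split MAC addresses into chunks for processing into RGB
--     new_data = []
--     new_types = []
--
--     for row_idx, row in enumerate(data):
--         new_row = []
--         current_types = []
--
--         for col_idx, (value, dtype) in enumerate(zip(row, types_list)):
--             if dtype == "MAC Address":
--                 mac = str(value).replace(":", "")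
--                 if len(mac) >= 12:
--                     chunk1 = mac[:6]
--                     chunk2 = mac[6:12]
--                     new_row.extend([chunk1, chunk2])
--                     current_types.extend(["MAC Address", "MAC Address"])
--                 else:
--                     new_row.append(value)
--                     current_types.append("String")
--             else:
--                 new_row.append(value)
--                 current_types.append(dtype)
--
--         new_data.append(new_row)
--         if row_idx == 0:
--             new_types = current_types
--
--     return new_data, new_types
-- ===== SOURCE B (Python) =====
-- def _split_mac(data, types_list):
--     # Column-major sweep: for each (column, dtype) build the column of split
--     # pieces for every row, then extend the growing output rows with it; the
--     # type list grows from the column's first-row piece.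
--     def pieces(value, dtype):
--         if dtype == "MAC Address":
--             mac = str(value).replace(":", "")
--             if len(mac) >= 12:
--                 return [mac[:6], mac[6:12]], ["MAC Address", "MAC Address"]
--             return [value], ["String"]
--         return [value], [dtype]
--
--     new_data = [[] for _ in data]
--     new_types = []
--     width = max(map(len, data), default=0)
--     for j, dtype in enumerate(types_list[:width]):
--         col = [pieces(row[j], dtype) if j < len(row) else ([], []) for row in data]
--         for acc_row, (vals, _) in zip(new_data, col):
--             acc_row.extend(vals)
--         if col:
--             new_types += col[0][1]
--     return new_data, new_types
-- ===== Notes on version B (the rewrite author's own statement) =====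
-- stated objective: alternative
-- what changed: Replaces A's row-major nested loop (rebuilding the type list per row, keeping row 0's) with a column-major sweep that materialises each column's split pieces, extends every output row with its piece, and grows the type list from the column's first-row piece.
import Mathlib
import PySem

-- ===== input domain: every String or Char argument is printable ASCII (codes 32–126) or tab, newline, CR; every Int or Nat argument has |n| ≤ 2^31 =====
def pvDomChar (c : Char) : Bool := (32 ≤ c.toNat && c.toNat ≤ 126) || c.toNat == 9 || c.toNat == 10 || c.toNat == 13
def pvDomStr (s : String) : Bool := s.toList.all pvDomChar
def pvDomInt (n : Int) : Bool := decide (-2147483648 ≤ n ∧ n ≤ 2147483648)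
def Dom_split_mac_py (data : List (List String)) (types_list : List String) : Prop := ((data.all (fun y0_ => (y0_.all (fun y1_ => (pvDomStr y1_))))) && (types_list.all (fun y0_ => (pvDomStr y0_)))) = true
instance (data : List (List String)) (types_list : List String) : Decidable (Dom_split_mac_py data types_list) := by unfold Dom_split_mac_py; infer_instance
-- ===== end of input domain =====

-- B sweeps column-major (building each column's split pieces, then zipping them onto the rows) instead of A's row-major nested loop; objective: alternative.

-- ===== PORT A =====
-- outer loop over enumerate(data); inner loop over zip(row, types_list) accumulating (new_row, current_types)
def split_mac_py (data : List (List String)) (types_list : List String) : List (List String) × List String :=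
  (PySem.List.enumerate data).foldl
    (fun (acc : List (List String) × List String) (p : Int × List String) =>
      let inner := (p.2.zip types_list).foldl
        (fun (acc2 : List String × List String) (vt : String × String) =>
          if vt.2 == "MAC Address" then
            let mac := PySem.Str.replace vt.1 ":" ""
            if 12 ≤ PySem.Str.len mac then
              (acc2.1 ++ [PySem.Str.slice mac none (some 6), PySem.Str.slice mac (some 6) (some 12)],
               acc2.2 ++ ["MAC Address", "MAC Address"])
            else
              (acc2.1 ++ [vt.1], acc2.2 ++ ["String"])
          else
            (acc2.1 ++ [vt.1], acc2.2 ++ [vt.2])) ([], [])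
      (acc.1 ++ [inner.1], if p.1 == 0 then inner.2 else acc.2)) ([], [])

-- ===== PORT B =====
-- pieces(value, dtype): the (values, types) chunks one cell contributes
def pvPieces (value dtype : String) : List String × List String :=
  if dtype == "MAC Address" then
    let mac := PySem.Str.replace value ":" ""
    if 12 ≤ PySem.Str.len mac then
      ([PySem.Str.slice mac none (some 6), PySem.Str.slice mac (some 6) (some 12)],
       ["MAC Address", "MAC Address"])
    else ([value], ["String"])
  else ([value], [dtype])

-- column-major loop over enumerate(types_list[:width]); 'row[j] if j < len(row) else' is pyGet? (j ≥ 0 from enumerate)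
def split_mac_py_alt (data : List (List String)) (types_list : List String) : List (List String) × List String :=
  let width : Nat := data.foldl (fun a r => max a r.length) 0
  (PySem.List.enumerate (PySem.List.slice types_list none (some (width : Int)))).foldl
    (fun (acc : List (List String) × List String) (p : Int × String) =>
      let col := data.map (fun row =>
        match PySem.List.pyGet? row p.1 with
        | some v => pvPieces v p.2
        | none => ([], []))
      ((acc.1.zip col).map (fun q => q.1 ++ q.2.1),
       acc.2 ++ (match col with | [] => [] | c :: _ => c.2)))
    (data.map (fun _ => []), [])

-- ===== PRECONDITION & SPEC =====
def Spec_split_mac_py (data : List (List String)) (types_list : List String) (out : List (List String) × List String) : Prop := out = split_mac_py_alt data types_list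
instance (data : List (List String)) (types_list : List String) (out : List (List String) × List String) : Decidable (Spec_split_mac_py data types_list out) := by unfold Spec_split_mac_py; infer_instance

-- ===== CLAIM (what is proved, stated in full; the proofs are below) =====
def Claim_equal_split_mac_py : Prop := ∀ (data : List (List String)) (types_list : List String), Dom_split_mac_py data types_list → Spec_split_mac_py data types_list (split_mac_py data types_list)

-- ===== LEMMAS AND PROOFS =====

-- the row-major normal form both ports are reduced to
def pvRowVals (row ts : List String) : List String :=
  (row.zip ts).flatMap (fun vt => (pvPieces vt.1 vt.2).1)
def pvRowTys (row ts : List String) : List String :=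
  (row.zip ts).flatMap (fun vt => (pvPieces vt.1 vt.2).2)

-- A's inner loop over one row equals the two flatMaps.
theorem pv_inner_eq (zs : List (String × String)) (a b : List String) :
    zs.foldl
      (fun (acc2 : List String × List String) (vt : String × String) =>
          if vt.2 == "MAC Address" then
            if 12 ≤ PySem.Str.len (PySem.Str.replace vt.1 ":" "") then
              (acc2.1 ++ [PySem.Str.slice (PySem.Str.replace vt.1 ":" "") none (some 6), PySem.Str.slice (PySem.Str.replace vt.1 ":" "") (some 6) (some 12)],
               acc2.2 ++ ["MAC Address", "MAC Address"])
            else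
              (acc2.1 ++ [vt.1], acc2.2 ++ ["String"])
          else
            (acc2.1 ++ [vt.1], acc2.2 ++ [vt.2])) (a, b)
    = (a ++ zs.flatMap (fun vt => (pvPieces vt.1 vt.2).1),
       b ++ zs.flatMap (fun vt => (pvPieces vt.1 vt.2).2)) := by
  induction zs generalizing a b with
  | nil => simp
  | cons z zs ih =>
    simp only [List.foldl_cons, List.flatMap_cons]
    by_cases h : z.2 == "MAC Address"
    · simp only [if_pos h]
      by_cases h2 : 12 ≤ PySem.Str.len (PySem.Str.replace z.1 ":" "")
      · simp only [if_pos h2]; rw [ih]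
        simp only [pvPieces, if_pos h, if_pos h2]; simp
      · simp only [if_neg h2]; rw [ih]
        simp only [pvPieces, if_pos h, if_neg h2]; simp
    · simp only [if_neg h]; rw [ih]
      simp only [pvPieces, if_neg h]; simp

-- A's outer loop on rows with positive indices never changes the type component.
theorem pv_outer_eq (types_list : List String) (rows : List (List String)) (s : Int) (hs : 0 < s)
    (a : List (List String)) (b : List String) :
    (PySem.List.enumerate rows s).foldl
      (fun (acc : List (List String) × List String) (p : Int × List String) =>
        (acc.1 ++ [pvRowVals p.2 types_list],
         if p.1 == 0 then pvRowTys p.2 types_list else acc.2)) (a, b)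
    = (a ++ rows.map (fun row => pvRowVals row types_list), b) := by
  induction rows generalizing s a with
  | nil => simp [PySem.List.enumerate]
  | cons r rows ih =>
    rw [PySem.List.enumerate_cons]
    simp only [List.foldl_cons, List.map_cons]
    have hns : ¬ (s == 0) = true := by simp; omega
    simp only [hns, Bool.false_eq_true, if_false]
    rw [ih (s + 1) (by omega)]
    simp

-- pv_inner_eq specialised to a zipped row, phrased with the normal forms
theorem pv_inner_eq2 (row ts : List String) (a b : List String) :
    (row.zip ts).foldl
      (fun (acc2 : List String × List String) (vt : String × String) =>
          if vt.2 == "MAC Address" then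
            if 12 ≤ PySem.Str.len (PySem.Str.replace vt.1 ":" "") then
              (acc2.1 ++ [PySem.Str.slice (PySem.Str.replace vt.1 ":" "") none (some 6), PySem.Str.slice (PySem.Str.replace vt.1 ":" "") (some 6) (some 12)],
               acc2.2 ++ ["MAC Address", "MAC Address"])
            else
              (acc2.1 ++ [vt.1], acc2.2 ++ ["String"])
          else
            (acc2.1 ++ [vt.1], acc2.2 ++ [vt.2])) (a, b)
    = (a ++ pvRowVals row ts, b ++ pvRowTys row ts) := by
  rw [pv_inner_eq]
  simp [pvRowVals, pvRowTys]

-- A reduced to the row-major normal form.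
theorem pv_A_eq (data : List (List String)) (types_list : List String) :
    split_mac_py data types_list
    = (data.map (fun row => pvRowVals row types_list),
       data.head?.elim [] (fun r => pvRowTys r types_list)) := by
  unfold split_mac_py
  cases data with
  | nil => simp [PySem.List.enumerate]
  | cons r rows =>
    rw [PySem.List.enumerate_cons]
    simp only [List.foldl_cons, pv_inner_eq2, List.nil_append, beq_self_eq_true, if_true]
    have := pv_outer_eq types_list rows (0 + 1) (by omega)
      [pvRowVals r types_list] (pvRowTys r types_list)
    rw [show ((0 : Int) + 1) = (1 : Int) by norm_num] at this
    rw [show ((0 : Int) + 1) = (1 : Int) by norm_num]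
    rw [this]
    simp

-- one cell: the column piece at index n prepends onto the tail of the row normal form
theorem pv_cell_step (row : List String) (n : Nat) (t : String) (ts : List String)
    (f : String × String → List String) :
    ((row.drop n).zip (t :: ts)).flatMap f
    = (match row[n]? with | some v => f (v, t) | none => ([] : List String))
      ++ ((row.drop (n + 1)).zip ts).flatMap f := by
  by_cases h : n < row.length
  · rw [List.drop_eq_getElem_cons h, List.getElem?_eq_getElem h]
    simp only [List.zip_cons_cons, List.flatMap_cons]
  · have h1 : row[n]? = none := by
      rw [List.getElem?_eq_none_iff]; omega
    have h2 : row.drop n = [] := by simp; omega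
    have h3 : row.drop (n + 1) = [] := by simp; omega
    simp [h1, h2, h3]

-- zipping a column of pieces onto the accumulated rows is a pointwise map
theorem pv_zip_map (l : List (List String)) (g : List String → List String)
    (h : List String → List String × List String) :
    ((l.map g).zip (l.map h)).map (fun q => q.1 ++ q.2.1)
    = l.map (fun r => g r ++ (h r).1) := by
  rw [List.zip_map']
  simp

-- the head of a mapped column
theorem pv_head_map (l : List (List String)) (h : List String → List String × List String) :
    (match l.map h with | [] => ([] : List String) | c :: _ => c.2)
    = l.head?.elim [] (fun r => (h r).2) := by
  cases l <;> rfl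

-- B's column loop, generalized over the start column n and accumulated state.
theorem pv_B_loop (data : List (List String)) (ts : List String) :
    ∀ (n : Nat) (g : List String → List String) (t0 : List String),
    (PySem.List.enumerate ts (n : Int)).foldl
      (fun (acc : List (List String) × List String) (p : Int × String) =>
        ((acc.1.zip (data.map (fun row =>
            match PySem.List.pyGet? row p.1 with
            | some v => pvPieces v p.2
            | none => ([], [])))).map (fun q => q.1 ++ q.2.1),
         acc.2 ++ (match data.map (fun row =>
            match PySem.List.pyGet? row p.1 with
            | some v => pvPieces v p.2
            | none => ([], [])) with | [] => [] | c :: _ => c.2)))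
      (data.map g, t0)
    = (data.map (fun row => g row ++ pvRowVals (row.drop n) ts),
       t0 ++ data.head?.elim [] (fun r => pvRowTys (r.drop n) ts)) := by
  induction ts with
  | nil =>
    intro n g t0
    cases data <;> simp [PySem.List.enumerate, pvRowVals, pvRowTys]
  | cons t ts ih =>
    intro n g t0
    rw [PySem.List.enumerate_cons]
    simp only [List.foldl_cons, PySem.List.pyGet?_natCast]
    rw [pv_zip_map, pv_head_map]
    rw [show ((n : Int) + 1) = ((n + 1 : Nat) : Int) by push_cast; ring]
    have hih := ih (n + 1)
      (fun row => g row ++ (match row[n]? with | some v => pvPieces v t | none => ([], [])).1)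
      (t0 ++ data.head?.elim [] (fun r =>
        (match r[n]? with | some v => pvPieces v t | none => ([], [])).2))
    rw [hih]
    refine Prod.ext ?_ ?_
    · show _ = List.map _ data
      apply List.map_congr_left
      intro row _
      rw [List.append_assoc]
      simp only [pvRowVals]
      rw [pv_cell_step row n t ts (fun vt => (pvPieces vt.1 vt.2).1)]
      cases hr : row[n]? <;> simp
    · show _ = t0 ++ _
      rw [List.append_assoc]
      cases data with
      | nil => simp
      | cons r rows =>
        simp only [pvRowTys, List.head?_cons, Option.elim_some]
        rw [pv_cell_step r n t ts (fun vt => (pvPieces vt.1 vt.2).2)]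
        cases hr : r[n]? <;> simp

-- the fold computing the widest row dominates every initial value and every member's length
theorem pv_foldl_max_init_le (l : List (List String)) :
    ∀ a : Nat, a ≤ l.foldl (fun a r => max a r.length) a := by
  induction l with
  | nil => intro a; simp
  | cons r l ih =>
    intro a
    simp only [List.foldl_cons]
    exact le_trans (le_max_left a r.length) (ih _)

theorem pv_mem_le_foldl_max (l : List (List String)) (row : List String) (h : row ∈ l) :
    ∀ a : Nat, row.length ≤ l.foldl (fun a r => max a r.length) a := by
  induction l with
  | nil => cases h
  | cons r l ih =>
    intro a
    simp only [List.foldl_cons]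
    rcases List.mem_cons.mp h with rfl | h'
    · exact le_trans (le_max_right a row.length) (pv_foldl_max_init_le l _)
    · exact ih h' _

-- truncating the type list past a row's length does not change the zip
theorem pv_zip_take (row : List String) :
    ∀ (ts : List String) (m : Nat), row.length ≤ m → row.zip (ts.take m) = row.zip ts := by
  induction row with
  | nil => intro ts m _; simp
  | cons x row ih =>
    intro ts m h
    cases m with
    | zero => simp at h
    | succ m =>
      cases ts with
      | nil => simp
      | cons t ts =>
        simp only [List.take_succ_cons, List.zip_cons_cons]
        rw [ih ts m (by simpa using h)]

-- ===== VERDICT (by name: the statement is the Claim_ definition above) =====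
theorem split_mac_py_spec : Claim_equal_split_mac_py := by
  intro data types_list _
  unfold Spec_split_mac_py
  simp only [split_mac_py_alt]
  rw [pv_A_eq, PySem.List.slice_to_natCast]
  have := pv_B_loop data
    (types_list.take (data.foldl (fun a r => max a r.length) 0)) 0 (fun _ => []) []
  simp only [Nat.cast_zero, List.drop_zero, List.nil_append] at this
  rw [this]
  refine Prod.ext ?_ ?_
  · show List.map _ data = List.map _ data
    apply List.map_congr_left
    intro row hrow
    simp only [pvRowVals]
    rw [pv_zip_take row types_list _ (pv_mem_le_foldl_max data row hrow 0)]
  · cases data with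
    | nil => rfl
    | cons r rows =>
      simp only [List.head?_cons, Option.elim_some, pvRowTys]
      rw [pv_zip_take r types_list _ (pv_mem_le_foldl_max (r :: rows) r (by simp) 0)]
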